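-- pv_equiv track=rewrite | github.com/rickyjames1750/data-structures-and-algorithms | disburse_bonuses.py | getBonuses
-- ===== SOURCE A (Python) =====
-- def getBonuses(performance):
--     # Count how many workers there are
--     count = len(performance)
--     # Bonus array and init 1
--     bonus = [1] * count
--
--     # Now lets go from left to right
--     # Start at 1 becuase if we start at 0 we are not going to have anyone to our left
--     for i in range(1, count):
--         # if my performance is bigger than the guy on my left then I get a bonus
--         if performance[i-1] < performance[i]:
--             bonus[i] = bonus[i-1] + 1
--
--     # Don't want to go all the way to the right or else we go out of index
--     # - 1 -1 since we are going backwards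
--     for i in range(count - 2, -1, -1):
--         if performance[i+1] < performance[i]:
--             bonus[i] = max(bonus[i], bonus[i + 1] + 1)
--
--     return bonus
-- ===== SOURCE B (Python) =====
-- def getBonuses(performance):
--     # Different algorithm: process workers in ascending order of performance.
--     # When a worker is processed, every strictly-smaller neighbor is already
--     # final, so a single sweep over the sorted order suffices.
--     count = len(performance)
--     bonus = [1] * count
--     order = sorted(range(count), key=lambda i: performance[i])
--     for i in order:
--         if i - 1 >= 0 and performance[i - 1] < performance[i]:
--             bonus[i] = max(bonus[i], bonus[i - 1] + 1)
--         if i + 1 < count and performance[i + 1] < performance[i]: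
--             bonus[i] = max(bonus[i], bonus[i + 1] + 1)
--     return bonus
-- ===== Notes on version B (the rewrite author's own statement) =====
-- stated objective: alternative
-- what changed: Replaces A's two directional passes over a shared bonus array with a single sweep over the indices sorted by performance ascending, where each worker takes max(bonus[neighbor]+1) over strictly-smaller neighbors, which are already final when reached.
import Mathlib
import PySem

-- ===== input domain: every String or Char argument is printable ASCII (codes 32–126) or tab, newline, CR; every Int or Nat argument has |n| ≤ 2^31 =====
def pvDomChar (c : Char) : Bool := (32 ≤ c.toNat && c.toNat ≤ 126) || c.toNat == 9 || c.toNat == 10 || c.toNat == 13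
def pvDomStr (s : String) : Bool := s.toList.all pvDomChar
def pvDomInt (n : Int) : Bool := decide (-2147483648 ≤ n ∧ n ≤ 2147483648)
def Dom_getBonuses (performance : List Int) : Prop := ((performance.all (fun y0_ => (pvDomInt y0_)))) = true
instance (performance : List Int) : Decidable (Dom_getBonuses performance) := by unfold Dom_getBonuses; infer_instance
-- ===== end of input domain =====

-- B replaces A's two directional passes by one sweep over the indices sorted by
-- performance ascending (an alternative algorithm of similar cost, not faster).

-- ===== PORT A =====
-- literal transliteration of Source A's getBonuses
def getBonuses (performance : List Int) : List Int :=
  let count : Int := performance.length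
  let bonus : List Int := List.replicate performance.length 1
  -- for i in range(1, count): if performance[i-1] < performance[i]: bonus[i] = bonus[i-1] + 1
  let bonus := (PySem.List.pyRange 1 count 1).foldl (fun bonus i =>
      if PySem.List.pyGetD performance (i - 1) 0 < PySem.List.pyGetD performance i 0 then
        PySem.List.pySetD bonus i (PySem.List.pyGetD bonus (i - 1) 0 + 1)
      else bonus) bonus
  -- for i in range(count - 2, -1, -1): if performance[i+1] < performance[i]: bonus[i] = max(bonus[i], bonus[i+1] + 1)
  let bonus := (PySem.List.pyRange (count - 2) (-1) (-1)).foldl (fun bonus i =>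
      if PySem.List.pyGetD performance (i + 1) 0 < PySem.List.pyGetD performance i 0 then
        PySem.List.pySetD bonus i (max (PySem.List.pyGetD bonus i 0) (PySem.List.pyGetD bonus (i + 1) 0 + 1))
      else bonus) bonus
  bonus

-- ===== PORT B =====
-- the body of Source B's `for i in order` loop: two guarded neighbour updates
-- (`i - 1 >= 0 and …` / `i + 1 < count and …` become the conjunctive if-conditions)
def altStep (performance : List Int) (bonus : List Int) (i : Int) : List Int :=
  let bonus :=
    if 0 ≤ i - 1 ∧ PySem.List.pyGetD performance (i - 1) 0 < PySem.List.pyGetD performance i 0 then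
      PySem.List.pySetD bonus i
        (max (PySem.List.pyGetD bonus i 0) (PySem.List.pyGetD bonus (i - 1) 0 + 1))
    else bonus
  if i + 1 < (performance.length : Int) ∧
      PySem.List.pyGetD performance (i + 1) 0 < PySem.List.pyGetD performance i 0 then
    PySem.List.pySetD bonus i
      (max (PySem.List.pyGetD bonus i 0) (PySem.List.pyGetD bonus (i + 1) 0 + 1))
  else bonus

-- sorted(range(count), key=lambda i: performance[i]) then the single sweep
def getBonuses_alt (performance : List Int) : List Int :=
  let count : Int := performance.length
  let bonus : List Int := List.replicate performance.length 1
  let order := PySem.List.sorted (PySem.List.pyRange 0 count 1)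
      (fun i => PySem.List.pyGetD performance i 0) false
  order.foldl (altStep performance) bonus

-- ===== PRECONDITION & SPEC =====
def Spec_getBonuses (performance : List Int) (out : List Int) : Prop := out = getBonuses_alt performance
instance (performance : List Int) (out : List Int) : Decidable (Spec_getBonuses performance out) := by unfold Spec_getBonuses; infer_instance

-- ===== CLAIM (what is proved, stated in full; the proofs are below) =====
def Claim_equal_getBonuses : Prop := ∀ (performance : List Int), Dom_getBonuses performance → Spec_getBonuses performance (getBonuses performance)

-- ===== LEMMAS AND PROOFS =====

-- `runs l` = length of the strictly increasing streak ending at each position;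
-- proof-side characterisation both ports are reduced to.
def runsAux (prev : Option Int) (streak : Int) : List Int → List Int
  | [] => []
  | v :: rest =>
      let s : Int := match prev with
        | some pv => if pv < v then streak + 1 else 1
        | none => 1
      s :: runsAux (some v) s rest

def runs (vals : List Int) : List Int := runsAux none 0 vals

theorem length_runsAux (l : List Int) (prev : Option Int) (s : Int) :
    (runsAux prev s l).length = l.length := by
  induction l generalizing prev s with
  | nil => rfl
  | cons v rest ih => simp [runsAux, ih]

theorem length_runs (l : List Int) : (runs l).length = l.length := length_runsAux l none 0

theorem runsAux_pos (l : List Int) (prev : Option Int) (s : Int) (hs : 0 ≤ s)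
    (i : Nat) (h : i < (runsAux prev s l).length) : 1 ≤ (runsAux prev s l)[i] := by
  induction l generalizing prev s i with
  | nil => simp [runsAux] at h
  | cons v rest ih =>
    simp only [runsAux] at h ⊢
    cases i with
    | zero =>
      cases prev with
      | none => simp
      | some pv => simp only [List.getElem_cons_zero]; split <;> omega
    | succ j =>
      simp only [List.getElem_cons_succ]
      cases prev with
      | none => exact ih (some v) 1 (by omega) j (by simpa using h)
      | some pv =>
        by_cases hlt : pv < v
        · simpa [hlt] using ih (some v) (s+1) (by omega) j (by simpa [hlt] using h)
        · simpa [hlt] using ih (some v) 1 (by omega) j (by simpa [hlt] using h)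

theorem runs_pos (l : List Int) (i : Nat) (h : i < (runs l).length) : 1 ≤ (runs l)[i] :=
  runsAux_pos l none 0 (le_refl 0) i h

theorem runs_get_zero (l : List Int) (h : 0 < (runs l).length) : (runs l)[0] = 1 := by
  cases l with
  | nil => simp [runs, runsAux] at h
  | cons v rest => simp [runs, runsAux]

theorem runsAux_get_succ (l : List Int) (prev : Option Int) (s : Int)
    (i : Nat) (h : i + 1 < l.length) :
    (runsAux prev s l)[i + 1]'(by rw [length_runsAux]; exact h) =
      if l[i] < l[i+1] then (runsAux prev s l)[i]'(by rw [length_runsAux]; omega) + 1 else 1 := by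
  induction l generalizing prev s i with
  | nil => simp at h
  | cons v rest ih =>
    cases rest with
    | nil => simp at h
    | cons w rest' =>
      cases i with
      | zero => simp [runsAux]
      | succ j =>
        simp only [List.length_cons] at h
        have := ih (some v) (match prev with | some pv => if pv < v then s + 1 else 1 | none => 1) j (by simpa using by omega)
        simpa [runsAux] using this

theorem runs_get_succ (l : List Int) (i : Nat) (h : i + 1 < l.length) :
    (runs l)[i + 1]'(by rw [length_runs]; exact h) =
      if l[i] < l[i+1] then (runs l)[i]'(by rw [length_runs]; omega) + 1 else 1 :=
  runsAux_get_succ l none 0 i h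

-- the up/down streak arrays and the common target value resL
def upL (p : List Int) : List Int := runs p
def downL (p : List Int) : List Int := (runs p.reverse).reverse
def resL (p : List Int) : List Int := List.zipWith max (upL p) (downL p)

theorem length_upL (p : List Int) : (upL p).length = p.length := length_runs p
theorem length_downL (p : List Int) : (downL p).length = p.length := by
  simp [downL, length_runs]
theorem length_resL (p : List Int) : (resL p).length = p.length := by
  simp [resL, length_upL, length_downL]

theorem upL_pos (p : List Int) (i : Nat) (h : i < p.length) :
    1 ≤ (upL p)[i]'(by rw [length_upL]; exact h) :=
  runs_pos p i (by rw [length_runs]; exact h)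

theorem downL_pos (p : List Int) (i : Nat) (h : i < p.length) :
    1 ≤ (downL p)[i]'(by rw [length_downL]; exact h) := by
  have h2 : i < (downL p).length := by rw [length_downL]; exact h
  simp only [downL, List.getElem_reverse] at h2 ⊢
  exact runs_pos _ _ _

theorem downL_last (p : List Int) (h : 0 < p.length) :
    (downL p)[p.length - 1]'(by rw [length_downL]; omega) = 1 := by
  simp only [downL, List.getElem_reverse, length_runs, List.length_reverse]
  have e0 : p.length - 1 - (p.length - 1) = 0 := by omega
  simp_rw [e0]
  exact runs_get_zero _ (by simp [length_runs]; omega)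

theorem downL_get (p : List Int) (i : Nat) (h : i + 1 < p.length) :
    (downL p)[i]'(by rw [length_downL]; omega) =
      if p[i+1] < p[i]'(by omega) then (downL p)[i+1]'(by rw [length_downL]; omega) + 1 else 1 := by
  have hr : (runs p.reverse).length = p.length := by simp [length_runs]
  simp only [downL, List.getElem_reverse, hr]
  have e1 : p.length - 1 - i = (p.length - 1 - (i+1)) + 1 := by omega
  simp_rw [e1]
  rw [runs_get_succ p.reverse (p.length - 1 - (i+1)) (by simp; omega)]
  have e2 : ∀ (j : Nat) (hj : j < p.length), (p.reverse)[j]'(by simpa using hj) = p[p.length - 1 - j] := by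
    intro j hj; simp [List.getElem_reverse]
  rw [e2 _ (by omega), e2 _ (by omega)]
  have e3 : p.length - 1 - (p.length - 1 - (i+1)) = i + 1 := by omega
  have e4 : p.length - 1 - (p.length - 1 - (i+1) + 1) = i := by omega
  simp_rw [e3, e4]

theorem upL_get (p : List Int) (i : Nat) (h : i + 1 < p.length) :
    (upL p)[i + 1]'(by rw [length_upL]; exact h) =
      if p[i] < p[i+1] then (upL p)[i]'(by rw [length_upL]; omega) + 1 else 1 :=
  runs_get_succ p i h

theorem resL_get (p : List Int) (i : Nat) (h : i < p.length) :
    (resL p)[i]'(by rw [length_resL]; exact h) =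
      max ((upL p)[i]'(by rw [length_upL]; exact h)) ((downL p)[i]'(by rw [length_downL]; exact h)) := by
  simp [resL, List.getElem_zipWith]

theorem resL_pos (p : List Int) (i : Nat) (h : i < p.length) :
    1 ≤ (resL p)[i]'(by rw [length_resL]; exact h) := by
  rw [resL_get p i h]
  exact le_max_of_le_left (upL_pos p i h)

-- ===== A = resL : the two directional passes =====

-- the state of A's first loop after processing range(1, k)
def fwdState (p : List Int) (k : Nat) : List Int :=
  (upL p).take k ++ List.replicate (p.length - k) 1

theorem length_fwdState (p : List Int) (k : Nat) (hk : k ≤ p.length) :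
    (fwdState p k).length = p.length := by
  simp [fwdState, length_upL]; omega

theorem fwdState_get (p : List Int) (k j : Nat) (hk : k ≤ p.length) (hj : j < p.length) :
    (fwdState p k)[j]'(by rw [length_fwdState p k hk]; exact hj) =
      if _ : j < k then (upL p)[j]'(by rw [length_upL]; exact hj) else 1 := by
  have hl : ((upL p).take k).length = k := by simp [length_upL]; omega
  simp only [fwdState]
  by_cases h : j < k
  · rw [List.getElem_append_left (by omega)]
    simp [h, List.getElem_take]
  · rw [List.getElem_append_right (by omega)]
    simp [h]

theorem fwdState_full (p : List Int) : fwdState p p.length = upL p := by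
  simp [fwdState, List.take_of_length_le (le_of_eq (length_upL p))]

theorem fwd_step (p : List Int) (k : Nat) (hk : 1 ≤ k) (hk2 : k < p.length) :
    (if PySem.List.pyGetD p ((k : Int) - 1) 0 < PySem.List.pyGetD p (k : Int) 0 then
        PySem.List.pySetD (fwdState p k) (k : Int) (PySem.List.pyGetD (fwdState p k) ((k : Int) - 1) 0 + 1)
      else fwdState p k) = fwdState p (k + 1) := by
  have hcast : (k : Int) - 1 = ((k - 1 : Nat) : Int) := by omega
  rw [hcast]
  simp only [PySem.List.pyGetD_natCast, PySem.List.pySetD_natCast]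
  have hgp1 : p.getD (k - 1) 0 = p[k - 1]'(by omega) := List.getD_eq_getElem p 0 (by omega)
  have hgp2 : p.getD k 0 = p[k] := List.getD_eq_getElem p 0 hk2
  have hgb : (fwdState p k).getD (k - 1) 0 = (upL p)[k - 1]'(by rw [length_upL]; omega) := by
    rw [List.getD_eq_getElem _ 0 (by rw [length_fwdState p k (by omega)]; omega)]
    rw [fwdState_get p k (k - 1) (by omega) (by omega)]
    simp [Nat.sub_lt hk]
  rw [hgp1, hgp2, hgb]
  have hup : (upL p)[k]'(by rw [length_upL]; exact hk2) =
      if p[k - 1]'(by omega) < p[k] then (upL p)[k - 1]'(by rw [length_upL]; omega) + 1 else 1 := by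
    have := upL_get p (k - 1) (by omega)
    simp_rw [Nat.sub_add_cancel hk] at this
    exact this
  by_cases hc : p[k - 1]'(by omega) < p[k]
  · simp only [hc, if_pos]
    apply List.ext_getElem
    · rw [List.length_set, length_fwdState p k (by omega), length_fwdState p (k+1) (by omega)]
    · intro j hj1 hj2
      have hjn : j < p.length := by rw [List.length_set, length_fwdState p k (by omega)] at hj1; exact hj1
      rw [List.getElem_set]
      rw [fwdState_get p (k+1) j (by omega) hjn]
      by_cases hjk : j = k
      · subst hjk
        rw [if_pos rfl, dif_pos (by omega), hup, if_pos hc]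
      · rw [if_neg (by omega)]
        rw [fwdState_get p k j (by omega) hjn]
        by_cases hlt : j < k
        · rw [dif_pos hlt, dif_pos (by omega)]
        · rw [dif_neg hlt, dif_neg (by omega)]
  · rw [if_neg hc]
    apply List.ext_getElem
    · rw [length_fwdState p k (by omega), length_fwdState p (k+1) (by omega)]
    · intro j hj1 hj2
      have hjn : j < p.length := by rw [length_fwdState p k (by omega)] at hj1; exact hj1
      rw [fwdState_get p k j (by omega) hjn, fwdState_get p (k+1) j (by omega) hjn]
      by_cases hjk : j = k
      · subst hjk
        rw [dif_neg (by omega), dif_pos (by omega), hup, if_neg hc]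
      · by_cases hlt : j < k
        · rw [dif_pos hlt, dif_pos (by omega)]
        · rw [dif_neg hlt, dif_neg (by omega)]

theorem fwd_invariant (p : List Int) (k : Nat) (hk : k ≤ p.length) :
    (PySem.List.pyRange 1 (k : Int) 1).foldl (fun bonus i =>
      if PySem.List.pyGetD p (i - 1) 0 < PySem.List.pyGetD p i 0 then
        PySem.List.pySetD bonus i (PySem.List.pyGetD bonus (i - 1) 0 + 1)
      else bonus) (List.replicate p.length 1) = fwdState p k := by
  induction k with
  | zero =>
    rw [PySem.List.pyRange_one_eq_nil (by omega)]
    simp [fwdState]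
  | succ k ih =>
    by_cases hk1 : k = 0
    · subst hk1
      rw [show ((0 + 1 : Nat) : Int) = 1 by norm_num, PySem.List.pyRange_one_eq_nil (by omega),
        List.foldl_nil]
      apply List.ext_getElem
      · rw [List.length_replicate, length_fwdState p 1 (by omega)]
      · intro j hj1 hj2
        have hjn : j < p.length := by simpa using hj1
        simp only [List.getElem_replicate]
        rw [fwdState_get p 1 j (by omega) hjn]
        by_cases hj0 : j < 1
        · rw [dif_pos hj0]
          have hj0' : j = 0 := by omega
          subst hj0'
          exact (runs_get_zero p (by rw [length_runs]; omega)).symm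
        · rw [dif_neg hj0]
    · have hk1' : 1 ≤ k := by omega
      rw [show ((k + 1 : Nat) : Int) = (k : Int) + 1 by push_cast; ring]
      rw [PySem.List.pyRange_one_succ_right (by omega : (1:Int) ≤ (k:Int))]
      rw [List.foldl_append, ih (by omega), List.foldl_cons, List.foldl_nil]
      exact fwd_step p k hk1' (by omega)

-- the state of A's second loop when the t lowest indices are still unprocessed
def bwdState (p : List Int) (t : Nat) : List Int :=
  (upL p).take t ++ (resL p).drop t

theorem length_bwdState (p : List Int) (t : Nat) (ht : t ≤ p.length) :
    (bwdState p t).length = p.length := by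
  simp [bwdState, length_upL, length_resL]; omega

theorem bwdState_get (p : List Int) (t j : Nat) (ht : t ≤ p.length) (hj : j < p.length) :
    (bwdState p t)[j]'(by rw [length_bwdState p t ht]; exact hj) =
      if _ : j < t then (upL p)[j]'(by rw [length_upL]; exact hj)
      else (resL p)[j]'(by rw [length_resL]; exact hj) := by
  have hl : ((upL p).take t).length = t := by simp [length_upL]; omega
  simp only [bwdState]
  by_cases h : j < t
  · rw [List.getElem_append_left (by omega)]
    simp [h, List.getElem_take]
  · rw [List.getElem_append_right (by omega)]
    rw [dif_neg h]
    rw [List.getElem_drop]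
    apply getElem_congr rfl (by omega) (by rw [length_resL]; omega)

theorem bwdState_zero (p : List Int) : bwdState p 0 = resL p := by
  simp [bwdState]

theorem bwdState_init (p : List Int) (h : 0 < p.length) :
    bwdState p (p.length - 1) = upL p := by
  apply List.ext_getElem
  · rw [length_bwdState p _ (by omega), length_upL]
  · intro j hj1 hj2
    have hjn : j < p.length := by rw [length_bwdState p _ (by omega)] at hj1; exact hj1
    rw [bwdState_get p (p.length - 1) j (by omega) hjn]
    by_cases hlt : j < p.length - 1
    · rw [dif_pos hlt]
    · rw [dif_neg hlt]
      have hj : j = p.length - 1 := by omega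
      subst hj
      rw [resL_get p _ (by omega), downL_last p h]
      exact max_eq_left (upL_pos p _ (by omega))

theorem bwd_step (p : List Int) (t : Nat) (ht : t + 2 ≤ p.length) :
    (if PySem.List.pyGetD p ((t : Int) + 1) 0 < PySem.List.pyGetD p (t : Int) 0 then
        PySem.List.pySetD (bwdState p (t+1)) (t : Int)
          (max (PySem.List.pyGetD (bwdState p (t+1)) (t : Int) 0)
               (PySem.List.pyGetD (bwdState p (t+1)) ((t : Int) + 1) 0 + 1))
      else bwdState p (t+1)) = bwdState p t := by
  have hcast : (t : Int) + 1 = ((t + 1 : Nat) : Int) := by omega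
  rw [hcast]
  simp only [PySem.List.pyGetD_natCast, PySem.List.pySetD_natCast]
  have hgp1 : p.getD (t + 1) 0 = p[t + 1]'(by omega) := List.getD_eq_getElem p 0 (by omega)
  have hgp2 : p.getD t 0 = p[t]'(by omega) := List.getD_eq_getElem p 0 (by omega)
  have hgb1 : (bwdState p (t+1)).getD t 0 = (upL p)[t]'(by rw [length_upL]; omega) := by
    rw [List.getD_eq_getElem _ 0 (by rw [length_bwdState p (t+1) (by omega)]; omega)]
    rw [bwdState_get p (t+1) t (by omega) (by omega)]
    simp
  have hgb2 : (bwdState p (t+1)).getD (t+1) 0 = (resL p)[t+1]'(by rw [length_resL]; omega) := by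
    rw [List.getD_eq_getElem _ 0 (by rw [length_bwdState p (t+1) (by omega)]; omega)]
    rw [bwdState_get p (t+1) (t+1) (by omega) (by omega)]
    simp
  rw [hgp1, hgp2, hgb1, hgb2]
  have hdown := downL_get p t (by omega)
  by_cases hc : p[t + 1]'(by omega) < p[t]'(by omega)
  · have hup1 : (upL p)[t + 1]'(by rw [length_upL]; omega) = 1 := by
      rw [upL_get p t (by omega), if_neg (by omega)]
    have hres1 : (resL p)[t + 1]'(by rw [length_resL]; omega) =
        (downL p)[t + 1]'(by rw [length_downL]; omega) := by
      rw [resL_get p (t+1) (by omega), hup1]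
      exact max_eq_right (downL_pos p (t+1) (by omega))
    have hrest : (resL p)[t]'(by rw [length_resL]; omega) =
        max ((upL p)[t]'(by rw [length_upL]; omega))
            ((downL p)[t + 1]'(by rw [length_downL]; omega) + 1) := by
      rw [resL_get p t (by omega), hdown, if_pos hc]
    rw [if_pos hc]
    apply List.ext_getElem
    · rw [List.length_set, length_bwdState p (t+1) (by omega), length_bwdState p t (by omega)]
    · intro j hj1 hj2
      have hjn : j < p.length := by
        rw [List.length_set, length_bwdState p (t+1) (by omega)] at hj1; exact hj1
      rw [List.getElem_set]
      rw [bwdState_get p t j (by omega) hjn]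
      by_cases hjt : j = t
      · subst hjt
        rw [if_pos rfl, dif_neg (by omega), hrest, hres1]
      · rw [if_neg (by omega)]
        rw [bwdState_get p (t+1) j (by omega) hjn]
        by_cases hlt : j < t
        · rw [dif_pos hlt, dif_pos (by omega)]
        · rw [dif_neg (by omega), dif_neg hlt]
  · rw [if_neg hc]
    apply List.ext_getElem
    · rw [length_bwdState p (t+1) (by omega), length_bwdState p t (by omega)]
    · intro j hj1 hj2
      have hjn : j < p.length := by rw [length_bwdState p (t+1) (by omega)] at hj1; exact hj1
      rw [bwdState_get p (t+1) j (by omega) hjn, bwdState_get p t j (by omega) hjn]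
      by_cases hjt : j = t
      · subst hjt
        rw [dif_pos (by omega), dif_neg (by omega)]
        rw [resL_get p j (by omega), hdown, if_neg hc]
        exact (max_eq_left (upL_pos p j (by omega))).symm
      · by_cases hlt : j < t
        · rw [dif_pos (by omega), dif_pos hlt]
        · rw [dif_neg (by omega), dif_neg hlt]

theorem bwd_invariant (p : List Int) (t : Nat) (ht : t + 1 ≤ p.length) :
    (PySem.List.pyRange ((t : Int) - 1) (-1) (-1)).foldl (fun bonus i =>
      if PySem.List.pyGetD p (i + 1) 0 < PySem.List.pyGetD p i 0 then
        PySem.List.pySetD bonus i (max (PySem.List.pyGetD bonus i 0) (PySem.List.pyGetD bonus (i + 1) 0 + 1))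
      else bonus) (bwdState p t) = resL p := by
  induction t with
  | zero =>
    rw [PySem.List.pyRange_neg_one_eq_nil (by omega)]
    rw [List.foldl_nil, bwdState_zero]
  | succ t ih =>
    rw [show ((t + 1 : Nat) : Int) - 1 = (t : Int) by push_cast; ring]
    rw [PySem.List.pyRange_neg_one_cons (by omega : (-1:Int) < (t:Int))]
    rw [List.foldl_cons]
    rw [bwd_step p t (by omega)]
    exact ih (by omega)

theorem getBonuses_eq_resL (p : List Int) : getBonuses p = resL p := by
  show (PySem.List.pyRange ((p.length : Int) - 2) (-1) (-1)).foldl _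
      ((PySem.List.pyRange 1 (p.length : Int) 1).foldl _ (List.replicate p.length 1)) = resL p
  rw [fwd_invariant p p.length (le_refl _), fwdState_full]
  by_cases h0 : p.length = 0
  · have hp : p = [] := List.eq_nil_of_length_eq_zero h0
    subst hp
    simp [PySem.List.pyRange_neg_one_eq_nil, resL, upL, downL, runs, runsAux]
  · have h1 : 0 < p.length := by omega
    have hc : (p.length : Int) - 2 = ((p.length - 1 : Nat) : Int) - 1 := by omega
    rw [hc, ← bwdState_init p h1]
    exact bwd_invariant p (p.length - 1) (by omega)

-- ===== B = resL : neighbour characterisation of resL =====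

theorem upL_eq_res (p : List Int) (k : Nat) (hk : k < p.length) (h1 : 1 ≤ k)
    (hlt : p[k-1]'(by omega) < p[k]'hk) :
    (upL p)[k]'(by rw [length_upL]; exact hk) = (resL p)[k-1]'(by rw [length_resL]; omega) + 1 := by
  have hup : (upL p)[k]'(by rw [length_upL]; exact hk) = (upL p)[k-1]'(by rw [length_upL]; omega) + 1 := by
    have := upL_get p (k - 1) (by omega)
    simp_rw [Nat.sub_add_cancel h1] at this
    rw [this, if_pos hlt]
  have hdn : (downL p)[k-1]'(by rw [length_downL]; omega) = 1 := by
    have := downL_get p (k - 1) (by omega)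
    simp_rw [Nat.sub_add_cancel h1] at this
    rw [this, if_neg (by omega)]
  rw [hup, resL_get p (k-1) (by omega), hdn]
  have := upL_pos p (k-1) (by omega)
  omega

theorem upL_eq_one (p : List Int) (k : Nat) (hk : k < p.length)
    (h : ¬ (1 ≤ k ∧ p[k-1]'(by omega) < p[k]'hk)) :
    (upL p)[k]'(by rw [length_upL]; exact hk) = 1 := by
  by_cases h1 : 1 ≤ k
  · have hnlt : ¬ p[k-1]'(by omega) < p[k]'hk := fun hl => h ⟨h1, hl⟩
    have := upL_get p (k - 1) (by omega)
    simp_rw [Nat.sub_add_cancel h1] at this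
    rw [this, if_neg hnlt]
  · have hk0 : k = 0 := by omega
    subst hk0
    exact runs_get_zero p (by rw [length_runs]; omega)

theorem downL_eq_res (p : List Int) (k : Nat) (hk2 : k + 1 < p.length)
    (hlt : p[k+1]'hk2 < p[k]'(by omega)) :
    (downL p)[k]'(by rw [length_downL]; omega) = (resL p)[k+1]'(by rw [length_resL]; omega) + 1 := by
  have hdn : (downL p)[k]'(by rw [length_downL]; omega) = (downL p)[k+1]'(by rw [length_downL]; omega) + 1 := by
    rw [downL_get p k hk2, if_pos hlt]
  have hup : (upL p)[k+1]'(by rw [length_upL]; omega) = 1 := by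
    rw [upL_get p k hk2, if_neg (by omega)]
  rw [hdn, resL_get p (k+1) (by omega), hup]
  have := downL_pos p (k+1) (by omega)
  omega

theorem downL_eq_one (p : List Int) (k : Nat) (hk : k < p.length)
    (h : ∀ (h2 : k + 1 < p.length), ¬ p[k+1]'h2 < p[k]'hk) :
    (downL p)[k]'(by rw [length_downL]; exact hk) = 1 := by
  by_cases h2 : k + 1 < p.length
  · rw [downL_get p k h2, if_neg (h h2)]
  · have : k = p.length - 1 := by omega
    subst this
    exact downL_last p (by omega)

-- the two guarded updates of altStep, with indices and reads in getD form
theorem altStep_eq (p b : List Int) (k : Nat) :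
    altStep p b (k : Int) =
      (fun b1 => if k + 1 < p.length ∧ p.getD (k+1) 0 < p.getD k 0 then
          b1.set k (max (b1.getD k 0) (b1.getD (k+1) 0 + 1)) else b1)
      (if 1 ≤ k ∧ p.getD (k-1) 0 < p.getD k 0 then
          b.set k (max (b.getD k 0) (b.getD (k-1) 0 + 1)) else b) := by
  unfold altStep
  by_cases h1 : 1 ≤ k
  · rw [show (k:Int) - 1 = ((k-1:Nat):Int) from by omega,
      show (k:Int) + 1 = ((k+1:Nat):Int) from by omega]
    simp only [PySem.List.pyGetD_natCast, PySem.List.pySetD_natCast, Nat.cast_nonneg,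
      true_and, Nat.cast_lt, h1]
  · have hk0 : k = 0 := by omega
    subst hk0
    have hc1 : ¬ (0 ≤ ((0:Nat):Int) - 1 ∧
        PySem.List.pyGetD p (((0:Nat):Int) - 1) 0 < PySem.List.pyGetD p ((0:Nat):Int) 0) := by
      intro h; have := h.1; norm_num at this
    have hc2 : ¬ (1 ≤ (0:Nat) ∧ p.getD (0-1) 0 < p.getD 0 0) := by
      intro h; exact absurd h.1 (by norm_num)
    rw [if_neg hc1, if_neg hc2]
    rw [show ((0:Nat):Int) + 1 = ((1:Nat):Int) from by norm_num]
    simp only [PySem.List.pyGetD_natCast, PySem.List.pySetD_natCast, Nat.cast_lt]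

-- resL[k] as the max of the two guarded neighbour candidates
theorem resL_val (p : List Int) (k : Nat) (hk : k < p.length) :
    (resL p)[k]'(by rw [length_resL]; exact hk) =
      max (if 1 ≤ k ∧ p.getD (k-1) 0 < p.getD k 0 then (resL p).getD (k-1) 0 + 1 else 1)
          (if k+1 < p.length ∧ p.getD (k+1) 0 < p.getD k 0 then (resL p).getD (k+1) 0 + 1 else 1) := by
  rw [resL_get p k hk]
  have hgk : p.getD k 0 = p[k]'hk := List.getD_eq_getElem p 0 hk
  by_cases hA : 1 ≤ k ∧ p.getD (k-1) 0 < p.getD k 0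
  · have hA1 : 1 ≤ k := hA.1
    have hltA : p[k-1]'(by omega) < p[k]'hk := by
      have h := hA.2
      rwa [List.getD_eq_getElem p 0 (by omega : k - 1 < p.length), List.getD_eq_getElem p 0 hk] at h
    have hup := upL_eq_res p k hk hA1 hltA
    rw [if_pos hA, hup, List.getD_eq_getElem (resL p) 0 (by rw [length_resL]; omega)]
    by_cases hB : k+1 < p.length ∧ p.getD (k+1) 0 < p.getD k 0
    · have hB1 : k + 1 < p.length := hB.1
      have hltB : p[k+1]'hB1 < p[k]'hk := by
        have h := hB.2
        rwa [List.getD_eq_getElem p 0 hB1, List.getD_eq_getElem p 0 hk] at h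
      have hdn := downL_eq_res p k hB1 hltB
      rw [if_pos hB, hdn, List.getD_eq_getElem (resL p) 0 (by rw [length_resL]; omega)]
    · have hdn : (downL p)[k]'(by rw [length_downL]; exact hk) = 1 := by
        apply downL_eq_one p k hk
        intro h2 hlt2
        exact hB ⟨h2, by rwa [List.getD_eq_getElem p 0 h2, hgk]⟩
      rw [if_neg hB, hdn]
  · have hup : (upL p)[k]'(by rw [length_upL]; exact hk) = 1 := by
      apply upL_eq_one p k hk
      intro ⟨hA1, hA2⟩
      exact hA ⟨hA1, by rwa [List.getD_eq_getElem p 0 (by omega), hgk]⟩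
    rw [if_neg hA, hup]
    by_cases hB : k+1 < p.length ∧ p.getD (k+1) 0 < p.getD k 0
    · have hB1 : k + 1 < p.length := hB.1
      have hltB : p[k+1]'hB1 < p[k]'hk := by
        have h := hB.2
        rwa [List.getD_eq_getElem p 0 hB1, List.getD_eq_getElem p 0 hk] at h
      have hdn := downL_eq_res p k hB1 hltB
      rw [if_pos hB, hdn, List.getD_eq_getElem (resL p) 0 (by rw [length_resL]; omega)]
    · have hdn : (downL p)[k]'(by rw [length_downL]; exact hk) = 1 := by
        apply downL_eq_one p k hk
        intro h2 hlt2
        exact hB ⟨h2, by rwa [List.getD_eq_getElem p 0 h2, hgk]⟩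
      rw [if_neg hB, hdn]

-- the loop body writes exactly resL[k] at position k when its strictly-smaller
-- neighbours already hold their final values and position k still holds 1
theorem altStep_spec (p b : List Int) (k : Nat) (hk : k < p.length)
    (hlen : b.length = p.length)
    (hbk : b[k]'(by omega) = 1)
    (hleft : ∀ (h1 : 1 ≤ k), p[k-1]'(by omega) < p[k]'hk →
      b[k-1]'(by omega) = (resL p)[k-1]'(by rw [length_resL]; omega))
    (hright : ∀ (h2 : k+1 < p.length), p[k+1]'h2 < p[k]'hk →
      b[k+1]'(by omega) = (resL p)[k+1]'(by rw [length_resL]; omega)) :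
    altStep p b (k : Int) = b.set k ((resL p)[k]'(by rw [length_resL]; exact hk)) := by
  rw [altStep_eq]
  have hgk : p.getD k 0 = p[k]'hk := List.getD_eq_getElem p 0 hk
  have hbgk : b.getD k 0 = 1 := by
    rw [List.getD_eq_getElem b 0 (by omega)]; exact hbk
  have hval := resL_val p k hk
  by_cases hA : 1 ≤ k ∧ p.getD (k-1) 0 < p.getD k 0
  · have hA1 : 1 ≤ k := hA.1
    have hltA : p[k-1]'(by omega) < p[k]'hk := by
      have h := hA.2
      rwa [List.getD_eq_getElem p 0 (by omega : k - 1 < p.length), List.getD_eq_getElem p 0 hk] at h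
    have hbl : b.getD (k-1) 0 = (resL p).getD (k-1) 0 := by
      rw [List.getD_eq_getElem b 0 (by omega), List.getD_eq_getElem (resL p) 0 (by rw [length_resL]; omega)]
      exact hleft hA1 hltA
    rw [if_pos hA, hbgk, hbl]
    by_cases hB : k+1 < p.length ∧ p.getD (k+1) 0 < p.getD k 0
    · have hB1 : k + 1 < p.length := hB.1
      have hltB : p[k+1]'hB1 < p[k]'hk := by
        have h := hB.2
        rwa [List.getD_eq_getElem p 0 hB1, List.getD_eq_getElem p 0 hk] at h
      have hbr : b.getD (k+1) 0 = (resL p).getD (k+1) 0 := by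
        rw [List.getD_eq_getElem b 0 (by omega), List.getD_eq_getElem (resL p) 0 (by rw [length_resL]; omega)]
        exact hright hB1 hltB
      have hsetk : (b.set k (max 1 ((resL p).getD (k-1) 0 + 1))).getD k 0 =
          max 1 ((resL p).getD (k-1) 0 + 1) := by
        rw [List.getD_eq_getElem (b.set k (max 1 ((resL p).getD (k-1) 0 + 1))) 0
          (by rw [List.length_set]; omega), List.getElem_set, if_pos rfl]
      have hsetr : (b.set k (max 1 ((resL p).getD (k-1) 0 + 1))).getD (k+1) 0 = b.getD (k+1) 0 := by
        rw [List.getD_eq_getElem (b.set k (max 1 ((resL p).getD (k-1) 0 + 1))) 0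
          (by rw [List.length_set]; omega),
          List.getD_eq_getElem b 0 (by omega), List.getElem_set, if_neg (by omega)]
      simp only [if_pos hB, hsetk, hsetr, hbr, List.set_set]
      congr 1
      have hp1 : 1 ≤ (resL p).getD (k-1) 0 := by
        rw [List.getD_eq_getElem (resL p) 0 (by rw [length_resL]; omega)]
        exact resL_pos p (k-1) (by omega)
      have hp2 : 1 ≤ (resL p).getD (k+1) 0 := by
        rw [List.getD_eq_getElem (resL p) 0 (by rw [length_resL]; omega)]
        exact resL_pos p (k+1) (by omega)
      rw [hval, if_pos hA, if_pos hB]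
      omega
    · simp only [if_neg hB]
      congr 1
      rw [hval, if_pos hA, if_neg hB]
      omega
  · rw [if_neg hA]
    by_cases hB : k+1 < p.length ∧ p.getD (k+1) 0 < p.getD k 0
    · have hB1 : k + 1 < p.length := hB.1
      have hltB : p[k+1]'hB1 < p[k]'hk := by
        have h := hB.2
        rwa [List.getD_eq_getElem p 0 hB1, List.getD_eq_getElem p 0 hk] at h
      have hbr : b.getD (k+1) 0 = (resL p).getD (k+1) 0 := by
        rw [List.getD_eq_getElem b 0 (by omega), List.getD_eq_getElem (resL p) 0 (by rw [length_resL]; omega)]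
        exact hright hB1 hltB
      simp only [if_pos hB, hbgk, hbr]
      congr 1
      rw [hval, if_neg hA, if_pos hB]
    · simp only [if_neg hB]
      have hv1 : (resL p)[k]'(by rw [length_resL]; exact hk) = 1 := by
        rw [hval, if_neg hA, if_neg hB]
        omega
      rw [hv1, ← hbk, List.set_getElem_self (by omega)]

-- invariant for the sweep over the value-sorted suffix l: every index still in l
-- holds 1, every index already processed holds its final value resL
theorem fold_inv (p : List Int) (l : List Int) (b : List Int)
    (hmem : ∀ i ∈ l, 0 ≤ i ∧ i < (p.length : Int))
    (hnd : l.Nodup)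
    (hpw : l.Pairwise (fun a c => PySem.List.pyGetD p a 0 ≤ PySem.List.pyGetD p c 0))
    (hlen : b.length = p.length)
    (hone : ∀ (j : Nat) (hj : j < p.length), (j:Int) ∈ l → b[j]'(by omega) = 1)
    (hres : ∀ (j : Nat) (hj : j < p.length), (j:Int) ∉ l → b[j]'(by omega) = (resL p)[j]'(by rw [length_resL]; exact hj)) :
    l.foldl (altStep p) b = resL p := by
  induction l generalizing b with
  | nil =>
    rw [List.foldl_nil]
    apply List.ext_getElem
    · rw [hlen, length_resL]
    · intro j hj1 hj2
      exact hres j (by omega) (by simp)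
  | cons i t ih =>
    obtain ⟨hi0, hin⟩ := hmem i (List.mem_cons_self)
    have hik : i = ((i.toNat : Nat) : Int) := by omega
    set k : Nat := i.toNat with hkdef
    have hk : k < p.length := by omega
    have hhead : ∀ x ∈ t, PySem.List.pyGetD p i 0 ≤ PySem.List.pyGetD p x 0 :=
      (List.pairwise_cons.mp hpw).1
    have hstep : altStep p b i = b.set k ((resL p)[k]'(by rw [length_resL]; exact hk)) := by
      rw [hik]
      apply altStep_spec p b k hk hlen
      · exact hone k hk (by rw [← hik]; exact List.mem_cons_self)
      · intro h1 hlt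
        apply hres (k-1) (by omega)
        intro hmem1
        rcases List.mem_cons.mp hmem1 with heq | hmemt
        · omega
        · have := hhead _ hmemt
          rw [hik] at this
          simp only [PySem.List.pyGetD_natCast] at this
          rw [List.getD_eq_getElem p 0 hk, List.getD_eq_getElem p 0 (by omega : k - 1 < p.length)] at this
          omega
      · intro h2 hlt
        apply hres (k+1) (by omega)
        intro hmem1
        rcases List.mem_cons.mp hmem1 with heq | hmemt
        · omega
        · have := hhead _ hmemt
          rw [hik] at this
          simp only [PySem.List.pyGetD_natCast] at this
          rw [List.getD_eq_getElem p 0 hk, List.getD_eq_getElem p 0 h2] at this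
          omega
    rw [List.foldl_cons, hstep]
    have hlen' : (b.set k ((resL p)[k]'(by rw [length_resL]; exact hk))).length = p.length := by
      rw [List.length_set]; exact hlen
    refine ih _ (fun x hx => hmem x (List.mem_cons_of_mem i hx)) hnd.of_cons
      (List.pairwise_cons.mp hpw).2 hlen' ?_ ?_
    · intro j hj hjt
      have hji : (j : Int) ≠ i := by
        intro heq
        exact (List.nodup_cons.mp hnd).1 (heq ▸ hjt)
      rw [List.getElem_set, if_neg (by omega)]
      exact hone j hj (List.mem_cons_of_mem i hjt)
    · intro j hj hjt
      by_cases hjk : j = k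
      · subst hjk
        rw [List.getElem_set, if_pos rfl]
      · rw [List.getElem_set, if_neg (by omega)]
        apply hres j hj
        intro hmem1
        rcases List.mem_cons.mp hmem1 with heq | hmemt
        · omega
        · exact hjt hmemt
    
theorem getBonuses_alt_eq_resL (p : List Int) : getBonuses_alt p = resL p := by
  show (PySem.List.sorted (PySem.List.pyRange 0 (p.length : Int) 1)
      (fun i => PySem.List.pyGetD p i 0) false).foldl (altStep p) (List.replicate p.length 1) = resL p
  refine fold_inv p _ _ ?_ ?_ ?_ List.length_replicate ?_ ?_
  · intro i hi
    rw [PySem.List.mem_sorted] at hi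
    exact (PySem.List.mem_pyRange_one.mp hi)
  · exact (PySem.List.sorted_perm _ _ _).nodup_iff.mpr (PySem.List.nodup_pyRange_one 0 _)
  · exact PySem.List.sorted_pairwise _ _
  · intro j hj _
    exact List.getElem_replicate _
  · intro j hj hnot
    exfalso
    apply hnot
    rw [PySem.List.mem_sorted, PySem.List.mem_pyRange_one]
    omega

-- ===== VERDICT (by name: the statement is the Claim_ definition above) =====
theorem getBonuses_spec : Claim_equal_getBonuses := by
  intro p _
  show getBonuses p = getBonuses_alt p
  rw [getBonuses_eq_resL, getBonuses_alt_eq_resL]
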